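-- pv_equiv track=rewrite | github.com/modisfive/ProblemSolving | 프로그래머스/lv3/12987. 숫자 게임/숫자 게임.py | solution
-- ===== SOURCE A (Python) =====
-- def upper_bound(arr, k):
--     left, right = 0, len(arr) - 1
--
--     while left < right:
--         mid = (left + right) // 2
--         if k < arr[mid]:
--             right = mid
--         else:
--             left = mid + 1
--     return left
--
-- def solution(A, B):
--     answer = 0
--     A.sort()
--     B.sort()
--
--     for a in A:
--         result = upper_bound(B, a)
--         if a < B[result]:
--             answer += 1
--         del B[result]
--
--     return answer
-- ===== SOURCE B (Python) =====
-- def solution(A, B):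
--     sa = sorted(A)
--     sb = sorted(B)
--     i = 0
--     for b in sb:
--         if i < len(sa) and sa[i] < b:
--             i += 1
--     return i
-- ===== Notes on version B (the rewrite author's own statement) =====
-- stated objective: faster
-- what changed: Replaces A's per-element binary search plus O(n) list deletion over a shrinking B with a single two-pointer scan of the two sorted lists.
import Mathlib
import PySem

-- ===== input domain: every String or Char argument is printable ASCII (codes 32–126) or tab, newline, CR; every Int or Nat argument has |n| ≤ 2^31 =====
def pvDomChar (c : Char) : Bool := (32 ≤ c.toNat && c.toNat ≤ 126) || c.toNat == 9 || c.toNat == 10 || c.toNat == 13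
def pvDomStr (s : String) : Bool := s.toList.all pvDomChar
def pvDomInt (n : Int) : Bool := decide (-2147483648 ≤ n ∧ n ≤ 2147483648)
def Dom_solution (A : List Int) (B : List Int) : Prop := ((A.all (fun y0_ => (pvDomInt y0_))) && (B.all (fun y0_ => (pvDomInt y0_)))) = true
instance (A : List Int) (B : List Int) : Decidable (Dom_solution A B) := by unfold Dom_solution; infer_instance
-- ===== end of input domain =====

-- B replaces A's per-element binary search + list deletion by a single two-pointer scan over
-- the two sorted lists (asymptotically faster). Note: Python A sorts both arguments and empties
-- B in place; the equivalence proved here is about the return value only (Python B does not mutate).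

-- ===== PORT A =====
-- while-loop of upper_bound; `mid` is written out at each of its uses. `arr[mid]` is ported as
-- (pyGet? …).getD 0 — exact for every call this file reasons about, because upper_bound keeps
-- 0 ≤ left ≤ mid < right ≤ len arr - 1, so the access is always in range (no IndexError).
def ubLoop (arr : List Int) (k : Int) (left right : Int) : Int :=
  if h : left < right then
    if k < (PySem.List.pyGet? arr (PySem.Int.floordiv (left + right) 2)).getD 0 then
      ubLoop arr k left (PySem.Int.floordiv (left + right) 2)
    else
      ubLoop arr k (PySem.Int.floordiv (left + right) 2 + 1) right
  else left
termination_by (right - left).toNat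
decreasing_by
  · have h2 := (PySem.Int.floordiv_lt_iff_lt_mul (a := left + right) (b := 2)
      (q := right) (by norm_num)).mpr (by omega)
    omega
  · have h1 := PySem.Int.floordiv_two_mid_bounds (le_of_lt h)
    omega

def upper_bound (arr : List Int) (k : Int) : Int :=
  ubLoop arr k 0 ((arr.length : Int) - 1)

-- the for-loop of solution: state = (current B, answer); `del B[result]` is pop? at that index
def solLoop (Bs : List Int) (answer : Int) (la : List Int) : Int :=
  match la with
  | [] => answer
  | a :: rest =>
    match PySem.List.pyGet? Bs (upper_bound Bs a) with
    | none => answer   -- Python raises IndexError at `B[result]`; Pre_solution excludes these inputs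
    | some v =>
      match PySem.List.pop? Bs (upper_bound Bs a) with
      | none => if a < v then answer + 1 else answer   -- unreachable: the same index was just read
      | some p => solLoop p.2 (if a < v then answer + 1 else answer) rest

def solution (A : List Int) (B : List Int) : Int :=
  solLoop (PySem.List.sorted B (fun x => x)) 0 (PySem.List.sorted A (fun x => x))

-- ===== PORT B =====
-- Source B: i = 0; for b in sorted(B): if i < len(sa) and sa[i] < b: i += 1; return i
def altLoop (sa : List Int) (i : Int) (lb : List Int) : Int :=
  match lb with
  | [] => i
  | b :: rest =>
    if i < (sa.length : Int) ∧ (PySem.List.pyGet? sa i).getD 0 < b then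
      altLoop sa (i + 1) rest
    else
      altLoop sa i rest

def solution_alt (A : List Int) (B : List Int) : Int :=
  altLoop (PySem.List.sorted A (fun x => x)) 0 (PySem.List.sorted B (fun x => x))

-- ===== PRECONDITION & SPEC =====
-- A deletes one element of B per element of A, then indexes into B: it raises IndexError
-- exactly when len(A) > len(B); Pre_ excludes exactly those inputs.
def Pre_solution (A : List Int) (B : List Int) : Prop := A.length ≤ B.length
instance (A : List Int) (B : List Int) : Decidable (Pre_solution A B) := by
  unfold Pre_solution; infer_instance
def pvWitness_solution : List Int × List Int := ([1], [2])

def Spec_solution (A : List Int) (B : List Int) (out : Int) : Prop := out = solution_alt A B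
instance (A : List Int) (B : List Int) (out : Int) : Decidable (Spec_solution A B out) := by
  unfold Spec_solution; infer_instance

-- ===== CLAIM (what is proved, stated in full; the proofs are below) =====
def Claim_equal_solution : Prop :=
  ∀ (A : List Int) (B : List Int), Dom_solution A B → Pre_solution A B →
    Spec_solution A B (solution A B)

-- ===== LEMMAS AND PROOFS =====

-- proof-side two-pointer kernel: go sa sb = B's count when starting from the whole of sa
def go (sa sb : List Int) : Int :=
  match sa, sb with
  | _, [] => 0
  | [], _ => 0
  | a :: sa', b :: sb' => if a < b then 1 + go sa' sb' else go (a :: sa') sb'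
termination_by sb.length

lemma go_nil_left (sb : List Int) : go [] sb = 0 := by
  cases sb <;> simp [go]

lemma go_nil_right (sa : List Int) : go sa [] = 0 := by
  cases sa <;> simp [go]

-- elements of sb all ≤ the head of sa are skipped without a match
lemma go_skip (pre : List Int) (a : Int) (sa rest : List Int)
    (h : ∀ p ∈ pre, p ≤ a) : go (a :: sa) (pre ++ rest) = go (a :: sa) rest := by
  induction pre with
  | nil => rfl
  | cons p t ih =>
    simp only [List.cons_append, go]
    rw [if_neg (not_lt.mpr (h p (List.mem_cons_self ..)))]
    exact ih (fun q hq => h q (List.mem_cons_of_mem _ hq))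

lemma pairwise_getD_mono (l : List Int) (h : l.Pairwise (· ≤ ·)) :
    ∀ i j : Nat, i ≤ j → j < l.length → l.getD i 0 ≤ l.getD j 0 := by
  intro i j hij hj
  rcases eq_or_lt_of_le hij with rfl | hlt
  · exact le_refl _
  · have := List.pairwise_iff_getElem.mp h i j (by omega) hj hlt
    rw [List.getD_eq_getElem _ _ (by omega), List.getD_eq_getElem _ _ hj]
    exact this

-- binary-search invariant for A's upper_bound loop
lemma ubLoop_spec (sb : List Int) (a : Int)
    (hmono : ∀ i j : Nat, i ≤ j → j < sb.length → sb.getD i 0 ≤ sb.getD j 0) :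
    ∀ (n : Nat) (l r : Int), (r - l).toNat ≤ n →
      0 ≤ l → l ≤ r → r ≤ (sb.length : Int) - 1 →
      (∀ i : Nat, (i : Int) < l → sb.getD i 0 ≤ a) →
      (r = (sb.length : Int) - 1 ∨ a < sb.getD r.toNat 0) →
      l ≤ ubLoop sb a l r ∧ ubLoop sb a l r ≤ r ∧
      (∀ i : Nat, (i : Int) < ubLoop sb a l r → sb.getD i 0 ≤ a) ∧
      (ubLoop sb a l r = (sb.length : Int) - 1 ∨ a < sb.getD (ubLoop sb a l r).toNat 0) := by
  intro n
  induction n with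
  | zero =>
    intro l r hn h0 hlr hr hleft hright
    have hl : l = r := by omega
    rw [ubLoop, dif_neg (by omega)]
    exact ⟨le_refl _, hlr, hleft, by rw [hl]; exact hright⟩
  | succ n ih =>
    intro l r hn h0 hlr hr hleft hright
    by_cases hlt : l < r
    · rw [ubLoop, dif_pos hlt]
      have hb := PySem.Int.floordiv_two_mid_bounds (le_of_lt hlt)
      have hmr : PySem.Int.floordiv (l + r) 2 < r :=
        (PySem.Int.floordiv_lt_iff_lt_mul (by norm_num)).mpr (by omega)
      set m := PySem.Int.floordiv (l + r) 2 with hm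
      have h0m : 0 ≤ m := le_trans h0 hb.1
      have hmlen : m < (sb.length : Int) := by omega
      have hget : (PySem.List.pyGet? sb m).getD 0 = sb.getD m.toNat 0 := by
        rw [PySem.List.pyGet?_eq_some_getElem sb h0m hmlen, Option.getD_some,
          List.getD_eq_getElem _ _ (by omega)]
      by_cases hc : a < (PySem.List.pyGet? sb m).getD 0
      · rw [if_pos hc]
        obtain ⟨c1, c2, c3, c4⟩ :=
          ih l m (by omega) h0 hb.1 (by omega) hleft (Or.inr (by rw [← hget]; exact hc))
        exact ⟨c1, by omega, c3, c4⟩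
      · rw [if_neg hc]
        have hleft' : ∀ i : Nat, (i : Int) < m + 1 → sb.getD i 0 ≤ a := by
          intro i hi
          calc sb.getD i 0 ≤ sb.getD m.toNat 0 := hmono i m.toNat (by omega) (by omega)
            _ ≤ a := by rw [← hget]; exact not_lt.mp hc
        obtain ⟨c1, c2, c3, c4⟩ :=
          ih (m + 1) r (by omega) (by omega) (by omega) hr hleft' hright
        exact ⟨by omega, c2, c3, c4⟩
    · rw [ubLoop, dif_neg hlt]
      have hl : l = r := by omega
      exact ⟨le_refl _, hlr, hleft, by rw [hl]; exact hright⟩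

lemma upper_bound_spec (sb : List Int) (a : Int) (hlen : 1 ≤ sb.length)
    (hmono : ∀ i j : Nat, i ≤ j → j < sb.length → sb.getD i 0 ≤ sb.getD j 0) :
    0 ≤ upper_bound sb a ∧ upper_bound sb a ≤ (sb.length : Int) - 1 ∧
    (∀ i : Nat, (i : Int) < upper_bound sb a → sb.getD i 0 ≤ a) ∧
    (upper_bound sb a = (sb.length : Int) - 1 ∨ a < sb.getD (upper_bound sb a).toNat 0) := by
  have := ubLoop_spec sb a hmono ((sb.length : Int) - 1).toNat 0 ((sb.length : Int) - 1)
    (by omega) (le_refl _) (by omega) (le_refl _)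
    (by intro i hi; omega) (Or.inl rfl)
  exact ⟨this.1, this.2.1, this.2.2.1, this.2.2.2⟩

-- A's loop computes the two-pointer count on sorted inputs
lemma solLoop_eq_go :
    ∀ (sa : List Int), sa.Pairwise (· ≤ ·) →
    ∀ (sb : List Int), sb.Pairwise (· ≤ ·) → sa.length ≤ sb.length →
    ∀ ans : Int, solLoop sb ans sa = ans + go sa sb := by
  intro sa
  induction sa with
  | nil => intro _ sb _ _ ans; simp [solLoop, go_nil_left]
  | cons a sa' ih =>
    intro hpa sb hpb hlen ans
    have hlen1 : 1 ≤ sb.length := by simp at hlen; omega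
    obtain ⟨h0, h1, hpre, hdis⟩ :=
      upper_bound_spec sb a hlen1 (pairwise_getD_mono sb hpb)
    set r := upper_bound sb a with hr
    set n := r.toNat with hn
    have hnlen : n < sb.length := by omega
    have hget : PySem.List.pyGet? sb r = some sb[n] :=
      PySem.List.pyGet?_eq_some_getElem sb h0 (by omega)
    have hpop : PySem.List.pop? sb r = some (sb[n], sb.eraseIdx n) := by
      have hrn : r = (n : Int) := by omega
      rw [hrn]; exact PySem.List.pop?_natCast sb n hnlen
    have hstep : solLoop sb ans (a :: sa') =
        solLoop (sb.eraseIdx n) (if a < sb[n] then ans + 1 else ans) sa' := by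
      rw [solLoop, hget, hpop]
    rw [hstep]
    have hsb : sb = sb.take n ++ sb[n] :: sb.drop (n + 1) := by
      conv_lhs => rw [← List.take_append_drop n sb]
      rw [List.drop_eq_getElem_cons hnlen]
    have herase : sb.eraseIdx n = sb.take n ++ sb.drop (n + 1) :=
      List.eraseIdx_eq_take_drop_succ sb n
    have hpre_le : ∀ p ∈ sb.take n, p ≤ a := by
      intro p hp
      obtain ⟨j, hj, hje⟩ := List.mem_take_iff_getElem.mp hp
      have hja := hpre j (by omega)
      rw [List.getD_eq_getElem _ _ (by omega)] at hja
      rw [← hje]; exact hja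
    have ha_sa' : ∀ x ∈ sa', a ≤ x := fun x hx => List.rel_of_pairwise_cons hpa hx
    have hpa' : sa'.Pairwise (· ≤ ·) := hpa.of_cons
    have hpb' : (sb.eraseIdx n).Pairwise (· ≤ ·) :=
      List.Pairwise.sublist (List.eraseIdx_sublist sb n) hpb
    have hlen' : sa'.length ≤ (sb.eraseIdx n).length := by
      rw [List.length_eraseIdx]
      simp at hlen
      simp [hnlen]
      omega
    have hgo_tail : go sa' (sb.take n ++ sb.drop (n + 1)) = go sa' (sb.drop (n + 1)) := by
      cases hsa' : sa' with
      | nil => rw [go_nil_left, go_nil_left]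
      | cons a1 t =>
        refine go_skip _ a1 _ _ (fun p hp => le_trans (hpre_le p hp) ?_)
        exact ha_sa' a1 (by rw [hsa']; exact List.mem_cons_self ..)
    by_cases hv : a < sb[n]
    · rw [if_pos hv, ih hpa' _ hpb' hlen', herase, hgo_tail]
      conv_rhs => rw [hsb]
      rw [go_skip _ a sa' _ hpre_le]
      simp only [go]
      rw [if_pos hv]
      ring
    · rw [if_neg hv]
      have hrl : r = (sb.length : Int) - 1 := by
        rcases hdis with h | h
        · exact h
        · exfalso
          rw [List.getD_eq_getElem _ _ (by omega)] at h
          exact hv h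
      have hne : n = sb.length - 1 := by omega
      have hsuf : sb.drop (n + 1) = [] := List.drop_eq_nil_of_le (by omega)
      have hall : ∀ p ∈ sb, p ≤ a := by
        intro p hp
        obtain ⟨j, hj, hje⟩ := List.mem_iff_getElem.mp hp
        rcases Nat.lt_or_ge j n with hjn | hjn
        · have := hpre j (by omega)
          rw [List.getD_eq_getElem _ _ (by omega)] at this
          rw [← hje]; exact this
        · have hjn' : j = n := by omega
          subst hjn'
          rw [← hje]; exact not_lt.mp hv
      rw [ih hpa' _ hpb' hlen', herase, hgo_tail, hsuf, go_nil_right]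
      have hz : go (a :: sa') sb = 0 := by
        have := go_skip sb a sa' [] hall
        rw [List.append_nil] at this
        rw [this, go_nil_right]
      rw [hz]

-- B's loop, with its index accumulator, computes the same kernel on the remaining suffix
lemma altLoop_eq_go :
    ∀ (lb sa : List Int) (i : Int), 0 ≤ i → i ≤ (sa.length : Int) →
      altLoop sa i lb = i + go (sa.drop i.toNat) lb := by
  intro lb
  induction lb with
  | nil => intro sa i _ _; simp [altLoop, go_nil_right]
  | cons b rest ih =>
    intro sa i h0 hle
    rcases eq_or_lt_of_le hle with heq | hlt
    · have hc : ¬ (i < (sa.length : Int) ∧ (PySem.List.pyGet? sa i).getD 0 < b) := by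
        rintro ⟨h, _⟩; omega
      rw [altLoop, if_neg hc, ih sa i h0 hle]
      have hdrop : sa.drop i.toNat = [] := List.drop_eq_nil_of_le (by omega)
      rw [hdrop, go_nil_left, go_nil_left]
    · have hnlen : i.toNat < sa.length := by omega
      have hget : (PySem.List.pyGet? sa i).getD 0 = sa[i.toNat] := by
        rw [PySem.List.pyGet?_eq_some_getElem sa h0 (by omega), Option.getD_some]
      have hdrop := List.drop_eq_getElem_cons hnlen
      by_cases hv : sa[i.toNat] < b
      · rw [altLoop, if_pos ⟨hlt, by rw [hget]; exact hv⟩,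
          ih sa (i + 1) (by omega) (by omega), hdrop]
        simp only [go]
        rw [if_pos hv]
        have ht : (i + 1).toNat = i.toNat + 1 := by omega
        rw [ht]
        ring
      · rw [altLoop, if_neg (by rintro ⟨_, h⟩; rw [hget] at h; exact hv h),
          ih sa i h0 hle, hdrop]
        simp only [go]
        rw [if_neg hv, ← hdrop]

-- ===== VERDICT (by name: the statement is the Claim_ definition above) =====
theorem solution_spec : Claim_equal_solution := by
  unfold Claim_equal_solution
  intro A B _ hpre
  unfold Pre_solution at hpre
  unfold Spec_solution solution solution_alt
  have hpa : (PySem.List.sorted A (fun x => x)).Pairwise (· ≤ ·) :=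
    PySem.List.sorted_pairwise A (fun x => x)
  have hpb : (PySem.List.sorted B (fun x => x)).Pairwise (· ≤ ·) :=
    PySem.List.sorted_pairwise B (fun x => x)
  have hlen : (PySem.List.sorted A (fun x => x)).length ≤
      (PySem.List.sorted B (fun x => x)).length := by
    rw [PySem.List.length_sorted, PySem.List.length_sorted]; exact hpre
  rw [solLoop_eq_go _ hpa _ hpb hlen 0,
    altLoop_eq_go _ (PySem.List.sorted A (fun x => x)) 0 (le_refl _) (by positivity)]
  simp
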